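-- pv_equiv track=rewrite | github.com/akashshah3/MindMentor | src/core/quiz_generator.py | _calculate_time_limit
-- ===== SOURCE A (Python) =====
-- from typing import Dict, List, Optional
--
-- def _calculate_time_limit(questions: List[Dict]) -> int:
--     """Calculate time limit based on question types"""
--     total_minutes = 0
--
--     for question in questions:
--         q_type = question.get('question_type', 'MCQ')
--
--         if q_type == 'MCQ':
--             total_minutes += 2  # 2 minutes per MCQ
--         elif q_type == 'Numeric':
--             total_minutes += 3  # 3 minutes per numeric
--         elif q_type == 'Descriptive':
--             total_minutes += 5  # 5 minutes per descriptive
--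
--     return max(10, total_minutes)  # Minimum 10 minutes
-- ===== SOURCE B (Python) =====
-- def _calculate_time_limit(questions):
--     """Calculate time limit based on question types"""
--     types = [q.get('question_type', 'MCQ') for q in questions]
--     total = 2 * types.count('MCQ') + 3 * types.count('Numeric') + 5 * types.count('Descriptive')
--     return max(10, total)
-- ===== Notes on version B (the rewrite author's own statement) =====
-- stated objective: alternative
-- what changed: Replaces the per-question accumulating branch loop with a two-phase decomposition: project each question to its type, then count occurrences of each weighted type and combine by a closed-form weighted sum.
import Mathlib
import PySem

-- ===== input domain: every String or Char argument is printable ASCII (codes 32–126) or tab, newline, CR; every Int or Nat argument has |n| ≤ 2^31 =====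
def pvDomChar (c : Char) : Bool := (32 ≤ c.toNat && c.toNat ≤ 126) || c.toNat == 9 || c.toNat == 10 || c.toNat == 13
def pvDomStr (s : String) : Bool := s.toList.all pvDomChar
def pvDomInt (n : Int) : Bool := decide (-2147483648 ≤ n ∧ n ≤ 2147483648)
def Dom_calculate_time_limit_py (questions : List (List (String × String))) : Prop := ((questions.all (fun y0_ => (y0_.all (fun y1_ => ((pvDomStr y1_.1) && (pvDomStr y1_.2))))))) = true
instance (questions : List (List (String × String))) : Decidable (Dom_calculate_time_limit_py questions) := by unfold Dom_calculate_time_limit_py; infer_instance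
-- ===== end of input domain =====

-- B replaces A's accumulating branch loop by a two-phase decomposition (project to types, then a weighted count sum); alternative, same cost.

-- ===== PORT A =====
-- q.get('question_type', 'MCQ') on the assoc-list dict (first match)
def pvQType (q : List (String × String)) : String :=
  PySem.Dict.getD (PySem.Dict.mk q) "question_type" "MCQ"

def calculate_time_limit_py (questions : List (List (String × String))) : Int :=
  let total_minutes : Int := questions.foldl (fun acc question =>
    let q_type := pvQType question
    if q_type = "MCQ" then acc + 2
    else if q_type = "Numeric" then acc + 3
    else if q_type = "Descriptive" then acc + 5
    else acc) 0
  max 10 total_minutes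

-- ===== PORT B =====
def calculate_time_limit_py_alt (questions : List (List (String × String))) : Int :=
  let types := questions.map pvQType
  let total : Int := 2 * (types.count "MCQ" : Int) + 3 * (types.count "Numeric" : Int)
      + 5 * (types.count "Descriptive" : Int)
  max 10 total

-- ===== PRECONDITION & SPEC =====
def Spec_calculate_time_limit_py (questions : List (List (String × String))) (out : Int) : Prop := out = calculate_time_limit_py_alt questions
instance (questions : List (List (String × String))) (out : Int) : Decidable (Spec_calculate_time_limit_py questions out) := by unfold Spec_calculate_time_limit_py; infer_instance

-- ===== CLAIM (what is proved, stated in full; the proofs are below) =====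
def Claim_equal_calculate_time_limit_py : Prop := ∀ (questions : List (List (String × String))), Dom_calculate_time_limit_py questions → Spec_calculate_time_limit_py questions (calculate_time_limit_py questions)

-- ===== LEMMAS AND PROOFS =====
theorem pv_fold_eq (qs : List (List (String × String))) (acc : Int) :
    qs.foldl (fun acc question =>
      let q_type := pvQType question
      if q_type = "MCQ" then acc + 2
      else if q_type = "Numeric" then acc + 3
      else if q_type = "Descriptive" then acc + 5
      else acc) acc
    = acc + 2 * ((qs.map pvQType).count "MCQ" : Int)
        + 3 * ((qs.map pvQType).count "Numeric" : Int)
        + 5 * ((qs.map pvQType).count "Descriptive" : Int) := by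
  induction qs generalizing acc with
  | nil => simp
  | cons q qs ih =>
    simp only [List.foldl_cons, List.map_cons, List.count_cons, ih]
    by_cases h1 : pvQType q = "MCQ"
    · simp [h1]; ring
    · by_cases h2 : pvQType q = "Numeric"
      · simp [h2]; ring
      · by_cases h3 : pvQType q = "Descriptive"
        · simp [h3]; ring
        · simp [h1, h2, h3]

-- ===== VERDICT (by name: the statement is the Claim_ definition above) =====
theorem calculate_time_limit_py_spec : Claim_equal_calculate_time_limit_py := by
  intro qs _
  unfold Spec_calculate_time_limit_py calculate_time_limit_py calculate_time_limit_py_alt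
  simp only [pv_fold_eq]
  ring_nf
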